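-- pv_equiv track=rewrite | github.com/ztlsw/MaiMBot | src/plugins/knowledge/src/utils/json_fix.py | _find_unclosed
-- ===== SOURCE A (Python) =====
-- def _find_unclosed(json_str):
--     """
--     Identifies the unclosed braces and brackets in the JSON string.
--
--     Args:
--         json_str (str): The JSON string to analyze.
--
--     Returns:
--         list: A list of unclosed elements in the order they were opened.
--     """
--     unclosed = []
--     inside_string = False
--     escape_next = False
--
--     for char in json_str:
--         if inside_string:
--             if escape_next:
--                 escape_next = False
--             elif char == "\\":
--                 escape_next = True
--             elif char == '"':
--                 inside_string = False
--         else: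
--             if char == '"':
--                 inside_string = True
--             elif char in "{[":
--                 unclosed.append(char)
--             elif char in "}]":
--                 if unclosed and ((char == "}" and unclosed[-1] == "{") or (char == "]" and unclosed[-1] == "[")):
--                     unclosed.pop()
--
--     return unclosed
-- ===== SOURCE B (Python) =====
-- def _mask(s):
--     """Return the characters of s outside string literals (two-phase helper)."""
--     out = []
--     i = 0
--     n = len(s)
--     while i < n:
--         c = s[i]
--         if c == '"':
--             i += 1
--             while i < n:
--                 if s[i] == '\\':
--                     i += 2
--                 elif s[i] == '"':
--                     i += 1
--                     break
--                 else:
--                     i += 1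
--         else:
--             out.append(c)
--             i += 1
--     return out
--
--
-- def _find_unclosed(json_str):
--     stack = []
--     for c in _mask(json_str):
--         if c in "{[":
--             stack.append(c)
--         elif c == "}" and stack and stack[-1] == "{":
--             stack.pop()
--         elif c == "]" and stack and stack[-1] == "[":
--             stack.pop()
--     return stack
-- ===== Notes on version B (the rewrite author's own statement) =====
-- stated objective: alternative
-- what changed: A's single scan with inside_string/escape_next flags is split into two phases: a masking pass that deletes every string literal (handling escapes and an unterminated trailing string), followed by a pure brace-matching stack pass over the masked characters.
import Mathlib
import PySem

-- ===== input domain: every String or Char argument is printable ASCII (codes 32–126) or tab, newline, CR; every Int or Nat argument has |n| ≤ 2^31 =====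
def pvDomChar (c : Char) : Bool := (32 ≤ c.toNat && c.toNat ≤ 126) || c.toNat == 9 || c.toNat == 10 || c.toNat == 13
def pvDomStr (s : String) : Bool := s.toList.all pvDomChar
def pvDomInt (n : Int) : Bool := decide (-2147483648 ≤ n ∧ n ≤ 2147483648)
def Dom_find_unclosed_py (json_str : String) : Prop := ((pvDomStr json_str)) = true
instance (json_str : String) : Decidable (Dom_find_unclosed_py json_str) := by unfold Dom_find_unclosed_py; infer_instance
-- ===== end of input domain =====

-- B re-implements _find_unclosed as two phases — mask out string literals, then a pure
-- brace-matching stack pass — instead of A's single flag-driven state machine (objective: alternative).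


-- ===== PORT A =====
-- one step of A's for-loop; state = (unclosed, inside_string, escape_next)
def stepA (s : List String × Bool × Bool) (c : Char) : List String × Bool × Bool :=
  let unclosed := s.1
  let inside := s.2.1
  let esc := s.2.2
  if inside then
    if esc then (unclosed, true, false)
    else if c = '\\' then (unclosed, true, true)
    else if c = '"' then (unclosed, false, false)
    else (unclosed, true, false)
  else
    if c = '"' then (unclosed, true, false)
    else if c = '{' ∨ c = '[' then (unclosed ++ [c.toString], false, false)
    else if c = '}' ∨ c = ']' then
      if unclosed ≠ [] ∧ ((c = '}' ∧ unclosed.getLast? = some "{") ∨ (c = ']' ∧ unclosed.getLast? = some "[")) then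
        (unclosed.dropLast, false, false)
      else (unclosed, false, false)
    else (unclosed, false, false)

def find_unclosed_py (json_str : String) : List String :=
  (json_str.toList.foldl stepA ([], false, false)).1

-- ===== PORT B =====
-- B's inner while loop: consume the rest of a string literal, returning what follows it
def skipStr : List Char → List Char
  | [] => []
  | '\\' :: [] => []
  | '\\' :: _ :: rest => skipStr rest
  | '"' :: rest => rest
  | _ :: rest => skipStr rest

-- catch-all equation of skipStr (its generated equation is conditional)
theorem skipStr_cons_ne (c : Char) (rest : List Char) (h1 : c ≠ '\\') (h2 : c ≠ '"') :
    skipStr (c :: rest) = skipStr rest := by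
  rw [skipStr.eq_def]
  split <;> simp_all

-- needed for maskStr's termination
theorem skipStr_length_le (cs : List Char) : (skipStr cs).length ≤ cs.length := by
  induction cs using skipStr.induct with
  | case1 => simp [skipStr]
  | case2 => simp [skipStr]
  | case3 head rest ih => simp [skipStr]; omega
  | case4 rest => simp [skipStr]
  | case5 c rest h1 h2 h3 ih =>
      have hb : c ≠ '\\' := by
        intro h; cases rest with
        | nil => exact h1 h rfl
        | cons a r => exact h2 a r h rfl
      rw [skipStr_cons_ne c rest hb (fun h => h3 h)]
      simpa using Nat.le_succ_of_le ih

-- B's outer while loop: the characters of s lying outside string literals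
def maskStr : List Char → List Char
  | [] => []
  | '"' :: rest => maskStr (skipStr rest)
  | c :: rest => c :: maskStr rest
termination_by cs => cs.length
decreasing_by
  · exact Nat.lt_succ_of_le (skipStr_length_le rest)
  · simp

-- B's stack loop over the masked characters
def stepB (stack : List String) (c : Char) : List String :=
  if c = '{' ∨ c = '[' then stack ++ [c.toString]
  else if c = '}' ∧ stack.getLast? = some "{" then stack.dropLast
  else if c = ']' ∧ stack.getLast? = some "[" then stack.dropLast
  else stack

def find_unclosed_py_alt (json_str : String) : List String :=
  (maskStr json_str.toList).foldl stepB []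

-- ===== PRECONDITION & SPEC =====
def Spec_find_unclosed_py (json_str : String) (out : List String) : Prop := out = find_unclosed_py_alt json_str
instance (json_str : String) (out : List String) : Decidable (Spec_find_unclosed_py json_str out) := by unfold Spec_find_unclosed_py; infer_instance

-- ===== CLAIM (what is proved, stated in full; the proofs are below) =====
def Claim_equal_find_unclosed_py : Prop := ∀ (json_str : String), Dom_find_unclosed_py json_str → Spec_find_unclosed_py json_str (find_unclosed_py json_str)

-- ===== LEMMAS AND PROOFS =====
-- catch-all equation of maskStr
theorem maskStr_cons_ne (c : Char) (rest : List Char) (hq : c ≠ '"') :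
    maskStr (c :: rest) = c :: maskStr rest := by
  rw [maskStr.eq_def]
  split <;> simp_all

-- A's fold, started inside a string with no pending escape, reaches the clean state exactly
-- where B's skipStr says the string literal ends (and touches the stack nowhere in between).
theorem foldA_inside : ∀ (cs : List Char) (st : List String),
    (cs.foldl stepA (st, true, false)).1 = ((skipStr cs).foldl stepA (st, false, false)).1 := by
  intro cs
  induction cs using skipStr.induct with
  | case1 => intro st; simp [skipStr]
  | case2 => intro st; simp [skipStr, stepA]
  | case3 head rest ih =>
      intro st
      have h1 : stepA (st, true, false) '\\' = (st, true, true) := by simp [stepA]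
      have h2 : stepA (st, true, true) head = (st, true, false) := by simp [stepA]
      calc (('\\' :: head :: rest).foldl stepA (st, true, false)).1
          = (rest.foldl stepA (st, true, false)).1 := by simp [List.foldl, h1, h2]
        _ = ((skipStr rest).foldl stepA (st, false, false)).1 := ih st
        _ = ((skipStr ('\\' :: head :: rest)).foldl stepA (st, false, false)).1 := by
              rw [show skipStr ('\\' :: head :: rest) = skipStr rest from rfl]
  | case4 rest =>
      intro st
      have h1 : stepA (st, true, false) '"' = (st, false, false) := by simp [stepA]
      simp [List.foldl, h1, show skipStr ('"' :: rest) = rest from rfl]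
  | case5 c rest h1 h2 h3 ih =>
      intro st
      have hb : c ≠ '\\' := by
        intro h; cases rest with
        | nil => exact h1 h rfl
        | cons a r => exact h2 a r h rfl
      have hq : c ≠ '"' := fun h => h3 h
      have hs : stepA (st, true, false) c = (st, true, false) := by simp [stepA, hb, hq]
      calc ((c :: rest).foldl stepA (st, true, false)).1
          = (rest.foldl stepA (st, true, false)).1 := by simp [List.foldl, hs]
        _ = ((skipStr rest).foldl stepA (st, false, false)).1 := ih st
        _ = ((skipStr (c :: rest)).foldl stepA (st, false, false)).1 := by
              rw [skipStr_cons_ne c rest hb hq]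

-- Outside a string and off the quote, one step of A is exactly one step of B's stack loop
-- (A's nonempty-guard + last-element test coincides with B's getLast? tests).
theorem stepA_outside (st : List String) (c : Char) (hq : c ≠ '"') :
    stepA (st, false, false) c = (stepB st c, false, false) := by
  unfold stepA stepB
  by_cases ho : c = '{' ∨ c = '['
  · simp [hq, ho]
  · by_cases hc : c = '}' ∨ c = ']'
    · rcases hc with hc | hc <;> subst hc
      · by_cases hl : st.getLast? = some "{"
        · have hne : st ≠ [] := by intro h; subst h; simp at hl
          simp [hl, hne]
        · simp [hl]
      · by_cases hl : st.getLast? = some "["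
        · have hne : st ≠ [] := by intro h; subst h; simp at hl
          simp [hl, hne]
        · simp [hl]
    · have h1 : c ≠ '}' := fun h => hc (Or.inl h)
      have h2 : c ≠ ']' := fun h => hc (Or.inr h)
      simp [hq, ho, h1, h2]

-- Main invariant: A's fold from a clean (outside-string) state computes B's stack fold of the mask.
theorem foldA_eq_foldB_mask : ∀ (cs : List Char) (st : List String),
    (cs.foldl stepA (st, false, false)).1 = (maskStr cs).foldl stepB st := by
  intro cs
  induction cs using maskStr.induct with
  | case1 => intro st; simp [maskStr]
  | case2 rest ih =>
      intro st
      have h1 : stepA (st, false, false) '"' = (st, true, false) := by simp [stepA]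
      calc (('"' :: rest).foldl stepA (st, false, false)).1
          = (rest.foldl stepA (st, true, false)).1 := by simp [List.foldl, h1]
        _ = ((skipStr rest).foldl stepA (st, false, false)).1 := foldA_inside rest st
        _ = (maskStr (skipStr rest)).foldl stepB st := ih st
        _ = (maskStr ('"' :: rest)).foldl stepB st := by
              rw [show maskStr ('"' :: rest) = maskStr (skipStr rest) from by rw [maskStr]]
  | case3 c rest h ih =>
      intro st
      have hq : c ≠ '"' := fun hh => h hh
      calc ((c :: rest).foldl stepA (st, false, false)).1
          = (rest.foldl stepA (stepB st c, false, false)).1 := by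
              simp [List.foldl, stepA_outside st c hq]
        _ = (maskStr rest).foldl stepB (stepB st c) := ih (stepB st c)
        _ = (maskStr (c :: rest)).foldl stepB st := by
              rw [maskStr_cons_ne c rest hq]; simp [List.foldl]

-- ===== VERDICT (by name: the statement is the Claim_ definition above) =====
theorem find_unclosed_py_spec : Claim_equal_find_unclosed_py := by
  intro s _
  unfold Spec_find_unclosed_py find_unclosed_py find_unclosed_py_alt
  exact foldA_eq_foldB_mask s.toList []
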